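-- pv_equiv track=rewrite | github.com/RippeiHayashi/FA_PAS_analysis_trial | py/cluster_pas_strict.py | coarse_cluster_positions
-- ===== SOURCE A (Python) =====
-- def coarse_cluster_positions(sorted_positions, max_dist=24):
--     """
--     Single-linkage clustering on already-filtered exact positions.
--     """
--     if not sorted_positions:
--         return
--
--     cluster = [sorted_positions[0]]
--     last = sorted_positions[0]
--
--     for p in sorted_positions[1:]:
--         if p - last <= max_dist:
--             cluster.append(p)
--         else:
--             yield cluster
--             cluster = [p]
--         last = p
--
--     yield cluster
-- ===== SOURCE B (Python) =====
-- def coarse_cluster_positions(sorted_positions, max_dist=24):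
--     """Gap-cut clustering: one pass collects the cut indices, then slices between them."""
--     xs = sorted_positions
--     n = len(xs)
--     if n == 0:
--         return
--     cuts = [i for i in range(1, n) if xs[i] - xs[i - 1] > max_dist]
--     bounds = [0] + cuts + [n]
--     for s, e in zip(bounds, bounds[1:]):
--         yield list(xs[s:e])
-- ===== Notes on version B (the rewrite author's own statement) =====
-- stated objective: alternative
-- what changed: Instead of A's stateful generator that grows a running cluster element by element, B first collects the cut indices where the gap exceeds max_dist and then yields the slices between consecutive boundaries.
import Mathlib
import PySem

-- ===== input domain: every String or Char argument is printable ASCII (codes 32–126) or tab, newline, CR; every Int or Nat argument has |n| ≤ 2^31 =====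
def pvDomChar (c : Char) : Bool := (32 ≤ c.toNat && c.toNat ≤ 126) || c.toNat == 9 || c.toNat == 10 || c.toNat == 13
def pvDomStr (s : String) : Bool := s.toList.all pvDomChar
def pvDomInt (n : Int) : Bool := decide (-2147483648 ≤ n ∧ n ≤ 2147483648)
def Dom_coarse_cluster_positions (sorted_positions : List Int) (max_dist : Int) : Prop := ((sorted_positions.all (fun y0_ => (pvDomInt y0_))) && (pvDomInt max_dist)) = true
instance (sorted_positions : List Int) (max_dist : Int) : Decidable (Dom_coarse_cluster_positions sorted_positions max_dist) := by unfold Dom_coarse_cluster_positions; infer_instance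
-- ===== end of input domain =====

-- B replaces A's stateful running-cluster generator by a cut-index scan followed by slicing; objective: alternative decomposition (same asymptotic cost).

-- ===== PORT A =====
-- the for-loop of A over sorted_positions[1:], state (cluster, last, yielded-so-far)
def pvAGo (md : Int) : List Int → Int → List Int → List (List Int) → List (List Int)
  | [], _, cluster, out => out ++ [cluster]
  | p :: ps, last, cluster, out =>
      if p - last ≤ md then pvAGo md ps p (cluster ++ [p]) out
      else pvAGo md ps p [p] (out ++ [cluster])

def coarse_cluster_positions (sorted_positions : List Int) (max_dist : Int) : List (List Int) :=
  match sorted_positions with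
  | [] => []
  | x :: rest => pvAGo max_dist rest x [x] []

-- ===== PORT B =====
-- cut indices: i in range(1, n) with xs[i] - xs[i-1] > max_dist
def pvCuts (xs : List Int) (md : Int) : List Nat :=
  (List.range' 1 (xs.length - 1)).filter (fun i => xs.getD i 0 - xs.getD (i - 1) 0 > md)

def coarse_cluster_positions_alt (sorted_positions : List Int) (max_dist : Int) : List (List Int) :=
  if sorted_positions.length = 0 then []
  else
    let bounds : List Nat := 0 :: (pvCuts sorted_positions max_dist ++ [sorted_positions.length])
    (bounds.zip bounds.tail).map
      (fun se => PySem.List.slice sorted_positions (some (se.1 : Int)) (some (se.2 : Int)))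

-- ===== PRECONDITION & SPEC =====
def Spec_coarse_cluster_positions (sorted_positions : List Int) (max_dist : Int) (out : List (List Int)) : Prop := out = coarse_cluster_positions_alt sorted_positions max_dist
instance (sorted_positions : List Int) (max_dist : Int) (out : List (List Int)) : Decidable (Spec_coarse_cluster_positions sorted_positions max_dist out) := by unfold Spec_coarse_cluster_positions; infer_instance

-- ===== CLAIM (what is proved, stated in full; the proofs are below) =====
def Claim_equal_coarse_cluster_positions : Prop := ∀ (sorted_positions : List Int) (max_dist : Int), Dom_coarse_cluster_positions sorted_positions max_dist → Spec_coarse_cluster_positions sorted_positions max_dist (coarse_cluster_positions sorted_positions max_dist)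

-- ===== LEMMAS AND PROOFS =====

-- prepend a prefix onto the first block (if any)
def pvPre (c : List Int) : List (List Int) → List (List Int)
  | [] => []
  | h :: t => (c ++ h) :: t

def pvSliceZip (xs : List Int) (bounds : List Nat) : List (List Int) :=
  (bounds.zip bounds.tail).map
    (fun se => PySem.List.slice xs (some (se.1 : Int)) (some (se.2 : Int)))

theorem pvAGo_acc (md : Int) (ps : List Int) (last : Int) (cl : List Int) (out : List (List Int)) :
    pvAGo md ps last cl out = out ++ pvAGo md ps last cl [] := by
  induction ps generalizing last cl out with
  | nil => simp [pvAGo]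
  | cons p ps ih =>
      simp only [pvAGo]
      split
      · rw [ih, ih p (cl ++ [p])]
      · rw [ih, ih p [p] ([] ++ [cl])]; simp

theorem pvAGo_pre (md : Int) (ps : List Int) (last : Int) (c1 c2 : List Int) :
    pvAGo md ps last (c1 ++ c2) [] = pvPre c1 (pvAGo md ps last c2 []) := by
  induction ps generalizing last c2 with
  | nil => simp [pvAGo, pvPre]
  | cons p ps ih =>
      simp only [pvAGo]
      split
      · rw [show c1 ++ c2 ++ [p] = c1 ++ (c2 ++ [p]) by simp, ih]
      · rw [pvAGo_acc md ps p [p] ([] ++ [c1 ++ c2]), pvAGo_acc md ps p [p] ([] ++ [c2])]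
        rcases hres : pvAGo md ps p [p] [] with _ | ⟨h, t⟩ <;> simp [pvPre]
 
-- A's recurrence
theorem pvA_rec (md x y : Int) (rest : List Int) :
    coarse_cluster_positions (x :: y :: rest) md =
      if y - x ≤ md then pvPre [x] (coarse_cluster_positions (y :: rest) md)
      else [x] :: coarse_cluster_positions (y :: rest) md := by
  simp only [coarse_cluster_positions, pvAGo]
  split
  · have := pvAGo_pre md rest y [x] [y]
    simpa using this
  · rw [pvAGo_acc md rest y [y] ([] ++ [[x]])]
    simp

-- cut-list recurrence
theorem pvCuts_rec (md x y : Int) (rest : List Int) :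
    pvCuts (x :: y :: rest) md =
      (if y - x > md then [1] else []) ++ (pvCuts (y :: rest) md).map (fun i : Nat => i + 1) := by
  simp only [pvCuts, List.length_cons]
  have h2 : List.range' 2 rest.length = (List.range' 1 rest.length).map (fun i : Nat => i + 1) := by
    have := List.map_add_range' (a := 1) 1 rest.length 1
    simp only [Nat.add_comm 1] at this ⊢
    exact this.symm
  have hr : List.range' 1 (rest.length + 1 + 1 - 1) = 1 :: (List.range' 1 (rest.length + 1 - 1)).map (fun i : Nat => i + 1) := by
    simp [List.range'_succ, h2]
  rw [hr, List.filter_cons, List.filter_map]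
  have hfe : (List.range' 1 (rest.length + 1 - 1)).filter
        ((fun i => decide ((x :: y :: rest).getD i 0 - (x :: y :: rest).getD (i - 1) 0 > md)) ∘ (fun i : Nat => i + 1))
      = (List.range' 1 (rest.length + 1 - 1)).filter
        (fun i => decide ((y :: rest).getD i 0 - (y :: rest).getD (i - 1) 0 > md)) := by
    apply List.filter_congr
    intro i hi
    have h1 : 1 ≤ i := (List.mem_range'_1.mp hi).1
    obtain ⟨j, rfl⟩ : ∃ j, i = j + 1 := ⟨i - 1, by omega⟩
    simp
  rw [hfe]
  by_cases h : y - x > md <;> simp [h, List.getD]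

-- slices of a shifted boundary list
theorem pvZipShift (x : Int) (xs : List Int) (bs : List Nat) :
    ((bs.map (fun i : Nat => i + 1)).zip ((bs.map (fun i : Nat => i + 1)).tail)).map
        (fun se => PySem.List.slice (x :: xs) (some (se.1 : Int)) (some (se.2 : Int)))
      = (bs.zip bs.tail).map
        (fun se => PySem.List.slice xs (some (se.1 : Int)) (some (se.2 : Int))) := by
  rw [← List.map_tail, List.zip_map, List.map_map]
  apply List.map_congr_left
  intro se _
  simp only [Function.comp_apply, Prod.map_fst, Prod.map_snd]
  rw [PySem.List.slice_natCast, PySem.List.slice_natCast]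
  simp [Nat.add_sub_add_right]

theorem pvSliceZip_cons (x : Int) (xs : List Int) (bs : List Nat) :
    pvSliceZip (x :: xs) (0 :: bs.map (fun i : Nat => i + 1)) = pvPre [x] (pvSliceZip xs (0 :: bs)) := by
  cases bs with
  | nil => simp [pvSliceZip, pvPre]
  | cons b bt =>
      have hz := pvZipShift x xs (b :: bt)
      simp only [List.map_cons, List.tail_cons] at hz
      simp only [pvSliceZip, List.map_cons, List.tail_cons, List.zip_cons_cons, List.map_cons]
      rw [hz]
      rw [PySem.List.slice_natCast, PySem.List.slice_natCast]
      simp [pvPre]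

theorem pvSliceZip_zero (xs : List Int) (bs : List Nat) :
    pvSliceZip xs (0 :: 0 :: bs) = [] :: pvSliceZip xs (0 :: bs) := by
  simp [pvSliceZip, PySem.List.slice_natCast]

-- B's recurrence
theorem pvB_rec (md x y : Int) (rest : List Int) :
    coarse_cluster_positions_alt (x :: y :: rest) md =
      if y - x ≤ md then pvPre [x] (coarse_cluster_positions_alt (y :: rest) md)
      else [x] :: coarse_cluster_positions_alt (y :: rest) md := by
  have hB : ∀ (zs : List Int), zs ≠ [] → coarse_cluster_positions_alt zs md
      = pvSliceZip zs (0 :: (pvCuts zs md ++ [zs.length])) := by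
    intro zs hz
    simp [coarse_cluster_positions_alt, pvSliceZip, List.length_eq_zero_iff, hz]
  rw [hB _ (by simp), hB _ (by simp), pvCuts_rec]
  by_cases h : y - x ≤ md
  · rw [if_pos h, if_neg (by omega : ¬ y - x > md), List.nil_append]
    rw [show (pvCuts (y :: rest) md).map (fun i : Nat => i + 1) ++ [(x :: y :: rest).length]
        = ((pvCuts (y :: rest) md) ++ [(y :: rest).length]).map (fun i : Nat => i + 1) by simp]
    exact pvSliceZip_cons x (y :: rest) _
  · rw [if_neg h, if_pos (by omega : y - x > md)]
    rw [show ([1] ++ (pvCuts (y :: rest) md).map (fun i : Nat => i + 1)) ++ [(x :: y :: rest).length]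
        = (0 :: ((pvCuts (y :: rest) md) ++ [(y :: rest).length])).map (fun i : Nat => i + 1) by simp]
    rw [pvSliceZip_cons x (y :: rest) (0 :: (pvCuts (y :: rest) md ++ [(y :: rest).length]))]
    rw [pvSliceZip_zero]
    simp [pvPre]

theorem pv_eq (xs : List Int) (md : Int) :
    coarse_cluster_positions xs md = coarse_cluster_positions_alt xs md := by
  induction xs with
  | nil => simp [coarse_cluster_positions, coarse_cluster_positions_alt]
  | cons x t ih =>
      cases t with
      | nil =>
          simp [coarse_cluster_positions, pvAGo, coarse_cluster_positions_alt, pvCuts,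
            PySem.List.slice_natCast]
      | cons y rest =>
          rw [pvA_rec, pvB_rec, ih]

-- ===== VERDICT (by name: the statement is the Claim_ definition above) =====
theorem coarse_cluster_positions_spec : Claim_equal_coarse_cluster_positions := by
  intro xs md _
  unfold Spec_coarse_cluster_positions
  exact pv_eq xs md
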